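-- pv_equiv track=rewrite | github.com/TaoishTechy/Braillestream | src/braillestream/mapping.py | row_major_bits_to_mask
-- ===== SOURCE A (Python) =====
-- from typing import Iterable, Sequence
--
-- ROW_MAJOR_TO_BRAILLE_BIT: tuple[int, ...] = (
--     0,  # row 0, col 0 -> dot 1
--     3,  # row 0, col 1 -> dot 4
--     1,  # row 1, col 0 -> dot 2
--     4,  # row 1, col 1 -> dot 5
--     2,  # row 2, col 0 -> dot 3
--     5,  # row 2, col 1 -> dot 6
--     6,  # row 3, col 0 -> dot 7
--     7,  # row 3, col 1 -> dot 8
-- )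
--
-- def row_major_bits_to_mask(bits: Sequence[int | bool]) -> int:
--     """
--     Convert 8 row-major 2×4 bits into a Unicode Braille mask.
--
--     Input order:
--
--         0 1
--         2 3
--         4 5
--         6 7
--
--     Unicode Braille order:
--
--         1 4
--         2 5
--         3 6
--         7 8
--
--     Parameters
--     ----------
--     bits:
--         Sequence of 8 truthy/falsy values.
--
--     Returns
--     -------
--     int
--         Unicode Braille mask in range 0..255.
--     """
--     if len(bits) != 8:
--         raise ValueError(f"Expected 8 bits for a 2×4 Braille cell, got {len(bits)}.")
--
--     mask = 0
--
--     for row_major_index, value in enumerate(bits):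
--         if bool(value):
--             braille_bit = ROW_MAJOR_TO_BRAILLE_BIT[row_major_index]
--             mask |= 1 << braille_bit
--
--     return mask
-- ===== SOURCE B (Python) =====
-- from typing import Sequence
--
-- ROW_MAJOR_TO_BRAILLE_BIT: tuple[int, ...] = (0, 3, 1, 4, 2, 5, 6, 7)
--
-- def _mask_of_packed(packed: int) -> int:
--     m = 0
--     for i in range(8):
--         if (packed >> i) & 1:
--             m |= 1 << ROW_MAJOR_TO_BRAILLE_BIT[i]
--     return m
--
-- PACKED_TO_MASK: tuple[int, ...] = tuple(_mask_of_packed(p) for p in range(256))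
--
-- def row_major_bits_to_mask(bits: Sequence[int | bool]) -> int:
--     if len(bits) != 8:
--         raise ValueError(f"Expected 8 bits for a 2×4 Braille cell, got {len(bits)}.")
--     idx = 0
--     for i, value in enumerate(bits):
--         if bool(value):
--             idx |= 1 << i
--     return PACKED_TO_MASK[idx]
-- ===== Notes on version B (the rewrite author's own statement) =====
-- stated objective: alternative
-- what changed: B packs the 8 truthy flags into a single row-major byte and returns the answer with one lookup in a 256-entry table precomputed once at module load, instead of OR-accumulating a per-set-bit shifted permutation value inside the loop.
import Mathlib
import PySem

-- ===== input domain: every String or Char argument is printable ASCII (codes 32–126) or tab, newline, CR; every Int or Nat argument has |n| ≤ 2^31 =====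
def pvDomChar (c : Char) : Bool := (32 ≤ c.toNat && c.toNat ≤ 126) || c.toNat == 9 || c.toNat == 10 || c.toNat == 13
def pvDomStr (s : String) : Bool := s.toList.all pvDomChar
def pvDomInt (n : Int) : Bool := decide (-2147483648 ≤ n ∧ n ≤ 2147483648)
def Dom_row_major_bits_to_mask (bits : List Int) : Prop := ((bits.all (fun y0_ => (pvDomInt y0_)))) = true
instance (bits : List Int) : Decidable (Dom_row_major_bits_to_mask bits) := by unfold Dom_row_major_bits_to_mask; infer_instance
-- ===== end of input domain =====

-- B replaces the per-set-bit OR accumulation with pack-into-a-byte + one lookup in a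
-- precomputed 256-entry table (objective: alternative decomposition; same cost).
-- ===== PORT A =====
def ROW_MAJOR_TO_BRAILLE_BIT : List Int := [0, 3, 1, 4, 2, 5, 6, 7]

-- for row_major_index, value in enumerate(bits): if bool(value): mask |= 1 << ROW_MAJOR_TO_BRAILLE_BIT[row_major_index]
-- (1 << b is ported as 2 ^ b on the nonnegative table entries)
def row_major_bits_to_mask (bits : List Int) : Int :=
  (PySem.List.enumerate bits).foldl
    (fun mask p =>
      if p.2 ≠ 0 then
        PySem.Int.bor mask (2 ^ ((PySem.List.pyGet? ROW_MAJOR_TO_BRAILLE_BIT p.1).getD 0).toNat)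
      else mask) 0

-- ===== PORT B =====
-- _mask_of_packed: OR together 1 << ROW_MAJOR_TO_BRAILLE_BIT[i] for each bit i set in packed
def mask_of_packed (packed : Nat) : Int :=
  (List.range 8).foldl
    (fun m i =>
      if (packed >>> i) &&& 1 = 1 then
        PySem.Int.bor m (2 ^ ((PySem.List.pyGet? ROW_MAJOR_TO_BRAILLE_BIT (i : Int)).getD 0).toNat)
      else m) 0

-- PACKED_TO_MASK = tuple(_mask_of_packed(p) for p in range(256))
def PACKED_TO_MASK : List Int := (List.range 256).map mask_of_packed

-- pack the truthy flags into idx (idx |= 1 << i), then one table lookup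
def row_major_bits_to_mask_alt (bits : List Int) : Int :=
  let idx : Int := (PySem.List.enumerate bits).foldl
    (fun acc p => if p.2 ≠ 0 then PySem.Int.bor acc (2 ^ p.1.toNat) else acc) 0
  (PySem.List.pyGet? PACKED_TO_MASK idx).getD 0

-- ===== PRECONDITION & SPEC =====
-- Pre_ excludes exactly the lists of length ≠ 8, on which Python A raises ValueError.
def Pre_row_major_bits_to_mask (bits : List Int) : Prop := bits.length = 8
instance (bits : List Int) : Decidable (Pre_row_major_bits_to_mask bits) := by unfold Pre_row_major_bits_to_mask; infer_instance
def pvWitness_row_major_bits_to_mask : List Int := [1, 0, 0, 1, 0, 0, 0, 1]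

def Spec_row_major_bits_to_mask (bits : List Int) (out : Int) : Prop := out = row_major_bits_to_mask_alt bits
instance (bits : List Int) (out : Int) : Decidable (Spec_row_major_bits_to_mask bits out) := by unfold Spec_row_major_bits_to_mask; infer_instance

-- ===== CLAIM (what is proved, stated in full; the proofs are below) =====
def Claim_equal_row_major_bits_to_mask : Prop := ∀ (bits : List Int), Dom_row_major_bits_to_mask bits → Pre_row_major_bits_to_mask bits → Spec_row_major_bits_to_mask bits (row_major_bits_to_mask bits)

-- ===== LEMMAS AND PROOFS =====

-- indicator: the 0/1 integer carrying exactly the truthiness of a bit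
def indB (b : Bool) : Int := if b then 1 else 0

-- replacing each element by its 0/1 indicator does not change a fold whose step only tests p.2 ≠ 0
lemma fold_ind (g : Int → Int → Int) (xs : List Int) (s m : Int) :
    (PySem.List.enumerate (xs.map fun x => indB (decide (x ≠ 0))) s).foldl
      (fun acc p => if p.2 ≠ 0 then g acc p.1 else acc) m
    = (PySem.List.enumerate xs s).foldl
      (fun acc p => if p.2 ≠ 0 then g acc p.1 else acc) m := by
  induction xs generalizing s m with
  | nil => rfl
  | cons x t ih =>
    simp only [List.map, PySem.List.enumerate_cons, List.foldl]
    by_cases h : x = 0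
    · simpa [h, indB] using ih (s + 1) m
    · simpa [h, indB] using ih (s + 1) (g m s)

lemma reduceA (xs : List Int) :
    row_major_bits_to_mask (xs.map fun x => indB (decide (x ≠ 0))) = row_major_bits_to_mask xs := by
  unfold row_major_bits_to_mask
  exact fold_ind
    (fun mask i => PySem.Int.bor mask (2 ^ ((PySem.List.pyGet? ROW_MAJOR_TO_BRAILLE_BIT i).getD 0).toNat))
    xs 0 0

lemma reduceB (xs : List Int) :
    row_major_bits_to_mask_alt (xs.map fun x => indB (decide (x ≠ 0))) = row_major_bits_to_mask_alt xs := by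
  unfold row_major_bits_to_mask_alt
  exact congrArg (fun i => (PySem.List.pyGet? PACKED_TO_MASK i).getD 0) (fold_ind (fun acc i => PySem.Int.bor acc (2 ^ i.toNat)) xs 0 0)

-- the 256 concrete cases, checked by the kernel
set_option maxRecDepth 8192 in
set_option maxHeartbeats 2000000 in
lemma key : ∀ (b1 b2 b3 b4 b5 b6 b7 b8 : Bool),
    row_major_bits_to_mask [indB b1, indB b2, indB b3, indB b4, indB b5, indB b6, indB b7, indB b8]
    = row_major_bits_to_mask_alt [indB b1, indB b2, indB b3, indB b4, indB b5, indB b6, indB b7, indB b8] := by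
  decide

-- ===== VERDICT (by name: the statement is the Claim_ definition above) =====
theorem row_major_bits_to_mask_spec : Claim_equal_row_major_bits_to_mask := by
  intro bits _ hpre
  unfold Spec_row_major_bits_to_mask
  match bits, hpre with
  | [x1, x2, x3, x4, x5, x6, x7, x8], _ =>
    rw [← reduceA, ← reduceB]
    simp only [List.map]
    exact key _ _ _ _ _ _ _ _
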